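-- pv_equiv track=rewrite | github.com/Char1esQian/cambridgedashboard | scripts/update_menu.py | split_meal_components
-- ===== SOURCE A (Python) =====
-- def split_meal_components(item: dict) -> dict:
--     name = str(item.get("name", "")).strip()
--     description = str(item.get("description", "")).strip()
--     raw = ", ".join(part for part in [name, description] if part)
--     tokens = [t.strip() for t in raw.split(",") if t.strip()]
--
--     base_keywords = ("rice", "noodle", "pasta", "crust", "flatbread", "quinoa", "potato")
--     sauce_keywords = ("sauce", "aioli", "pesto", "gravy", "chimichurri", "marinara", "curry", "dressing")
--
--     base = "none"
--     sauce = "none"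
--     ingredients = []
--
--     for token in tokens:
--         lower = token.lower()
--         if base == "none" and any(k in lower for k in base_keywords):
--             base = token
--             continue
--         if sauce == "none" and any(k in lower for k in sauce_keywords):
--             sauce = token
--             continue
--         ingredients.append(token)
--
--     if not ingredients and name:
--         ingredients = [name]
--
--     return {
--         "item_name": name or "Chef special",
--         "ingredients_list": ", ".join(ingredients) if ingredients else "Chef selected seasonal ingredients",
--         "base_or_crust": base,
--         "sauce_or_none": sauce,
--     }
-- ===== SOURCE B (Python) =====
-- def split_meal_components(item: dict) -> dict:
--     name = str(item.get("name", "")).strip()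
--     description = str(item.get("description", "")).strip()
--     raw = ", ".join(part for part in [name, description] if part)
--     tokens = [t.strip() for t in raw.split(",") if t.strip()]
--
--     base_keywords = ("rice", "noodle", "pasta", "crust", "flatbread", "quinoa", "potato")
--     sauce_keywords = ("sauce", "aioli", "pesto", "gravy", "chimichurri", "marinara", "curry", "dressing")
--
--     def hit(keywords, token):
--         low = token.lower()
--         return any(k in low for k in keywords)
--
--     n = len(tokens)
--     base_idx = next((i for i in range(n) if hit(base_keywords, tokens[i])), None)
--     sauce_idx = next((i for i in range(n)
--                       if i != base_idx and hit(sauce_keywords, tokens[i])), None)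
--
--     base = tokens[base_idx] if base_idx is not None else "none"
--     sauce = tokens[sauce_idx] if sauce_idx is not None else "none"
--     ingredients = [tokens[i] for i in range(n) if i != base_idx and i != sauce_idx]
--
--     if not ingredients and name:
--         ingredients = [name]
--
--     return {
--         "item_name": name or "Chef special",
--         "ingredients_list": ", ".join(ingredients) if ingredients else "Chef selected seasonal ingredients",
--         "base_or_crust": base,
--         "sauce_or_none": sauce,
--     }
-- ===== Notes on version B (the rewrite author's own statement) =====
-- stated objective: alternative
-- what changed: Replaced A's single stateful pass (base/sauce sentinels plus an ingredients accumulator) by staged index computations: find the index of the first base-matching token, then the index of the first sauce-matching token at a different index, then build the ingredients by filtering out exactly those two indices.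
import Mathlib
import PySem

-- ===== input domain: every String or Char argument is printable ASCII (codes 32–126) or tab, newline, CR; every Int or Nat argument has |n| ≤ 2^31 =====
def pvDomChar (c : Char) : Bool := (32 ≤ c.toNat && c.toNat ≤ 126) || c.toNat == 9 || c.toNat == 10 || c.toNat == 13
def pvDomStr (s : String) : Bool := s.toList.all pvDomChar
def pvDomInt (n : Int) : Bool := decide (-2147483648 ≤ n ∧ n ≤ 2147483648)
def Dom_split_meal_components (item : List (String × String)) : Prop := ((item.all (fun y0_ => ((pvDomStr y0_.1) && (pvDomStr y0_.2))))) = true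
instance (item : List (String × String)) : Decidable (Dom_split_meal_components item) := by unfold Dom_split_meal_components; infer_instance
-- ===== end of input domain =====

-- B replaces A's stateful three-way loop by staged index computations: first the index of the
-- base token, then the index of the sauce token among the other indices, then an index filter
-- for the ingredients (objective: alternative); return values only — neither program mutates.

-- ===== PORT A =====
-- shared preamble of both Pythons (identical source lines): name/description lookup, tokenisation
def pvBaseKeywords : List String := ["rice", "noodle", "pasta", "crust", "flatbread", "quinoa", "potato"]
def pvSauceKeywords : List String := ["sauce", "aioli", "pesto", "gravy", "chimichurri", "marinara", "curry", "dressing"]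

def pvTokens (item : List (String × String)) : String × List String :=
  let name := PySem.Str.strip ((PySem.Dict.mk item).getD "name" "")
  let description := PySem.Str.strip ((PySem.Dict.mk item).getD "description" "")
  let raw := PySem.Str.join ", " (([name, description]).filter (fun p => !(p == "")))
  (name, (((PySem.Str.split? raw ",").getD []).map PySem.Str.strip).filter (fun t => !(t == "")))

-- A's inline test: lower = token.lower(); any(k in lower for k in keywords)
def pvMatches (kws : List String) (t : String) : Bool :=
  kws.any (fun k => PySem.Str.isIn k (PySem.Str.lower t))

-- A's single pass: state (base, sauce, ingredients)
def pvLoopA : String → String → List String → List String → String × String × List String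
  | base, sauce, ing, [] => (base, sauce, ing)
  | base, sauce, ing, t :: ts =>
    if base == "none" && pvMatches pvBaseKeywords t then pvLoopA t sauce ing ts
    else if sauce == "none" && pvMatches pvSauceKeywords t then pvLoopA base t ing ts
    else pvLoopA base sauce (ing ++ [t]) ts

def split_meal_components (item : List (String × String)) : List (String × String) :=
  let nt := pvTokens item
  let name := nt.1
  let r := pvLoopA "none" "none" [] nt.2
  let ingredients := if r.2.2 == [] && !(name == "") then [name] else r.2.2
  [("item_name", if name == "" then "Chef special" else name),
   ("ingredients_list", if ingredients == [] then "Chef selected seasonal ingredients"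
                        else PySem.Str.join ", " ingredients),
   ("base_or_crust", r.1),
   ("sauce_or_none", r.2.1)]

-- ===== PORT B =====
-- B's helper hit(keywords, token)
def pvHit (kws : List String) (t : String) : Bool :=
  let low := PySem.Str.lower t
  kws.any (fun k => PySem.Str.isIn k low)

def split_meal_components_alt (item : List (String × String)) : List (String × String) :=
  let nt := pvTokens item
  let name := nt.1
  let tokens := nt.2
  let n := tokens.length
  -- indices i drawn from range n are in bounds, so tokens[i] is total: getD is exact here
  let baseIdx := (List.range n).find? (fun i => pvHit pvBaseKeywords (tokens.getD i ""))
  let sauceIdx := (List.range n).find? (fun i =>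
      !(some i == baseIdx) && pvHit pvSauceKeywords (tokens.getD i ""))
  let base := match baseIdx with | some i => tokens.getD i "" | none => "none"
  let sauce := match sauceIdx with | some i => tokens.getD i "" | none => "none"
  let ing0 := ((List.range n).filter (fun i =>
      !(some i == baseIdx) && !(some i == sauceIdx))).map (fun i => tokens.getD i "")
  let ingredients := if ing0 == [] && !(name == "") then [name] else ing0
  [("item_name", if name == "" then "Chef special" else name),
   ("ingredients_list", if ingredients == [] then "Chef selected seasonal ingredients"
                        else PySem.Str.join ", " ingredients),
   ("base_or_crust", base),
   ("sauce_or_none", sauce)]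

-- ===== PRECONDITION & SPEC =====
def Spec_split_meal_components (item : List (String × String)) (out : List (String × String)) : Prop := out = split_meal_components_alt item
instance (item : List (String × String)) (out : List (String × String)) : Decidable (Spec_split_meal_components item out) := by unfold Spec_split_meal_components; infer_instance

-- ===== CLAIM (what is proved, stated in full; the proofs are below) =====
def Claim_equal_split_meal_components : Prop := ∀ (item : List (String × String)), Dom_split_meal_components item → Spec_split_meal_components item (split_meal_components item)

-- ===== LEMMAS AND PROOFS =====
-- proof-side intermediate: "first token matching kws, and the list without it"
def pvPick (kws : List String) : List String → Option String × List String
  | [] => (none, [])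
  | t :: ts =>
    if pvMatches kws t then (some t, ts)
    else
      let r := pvPick kws ts
      (r.1, t :: r.2)

-- the keyword tests reject the literal token "none", so A's "none" sentinel is unambiguous
lemma ne_none_of_matches {kws : List String} {t : String}
    (hn : pvMatches kws "none" = false) (h : pvMatches kws t = true) : (t == "none") = false := by
  cases hc : (t == "none")
  · rfl
  · have : t = "none" := by simpa using hc
    subst this; rw [h] at hn; exact absurd hn (by simp)

lemma matches_base_none : pvMatches pvBaseKeywords "none" = false := by decide
lemma matches_sauce_none : pvMatches pvSauceKeywords "none" = false := by decide

lemma loopA_done (b s : String) (ing ts : List String)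
    (hb : (b == "none") = false) (hs : (s == "none") = false) :
    pvLoopA b s ing ts = (b, s, ing ++ ts) := by
  induction ts generalizing ing with
  | nil => simp [pvLoopA]
  | cons t ts ih => simp [pvLoopA, hb, hs, ih]

lemma loopA_base_set (b : String) (ing ts : List String) (hb : (b == "none") = false) :
    pvLoopA b "none" ing ts =
      (b, (pvPick pvSauceKeywords ts).1.getD "none", ing ++ (pvPick pvSauceKeywords ts).2) := by
  induction ts generalizing ing with
  | nil => simp [pvLoopA, pvPick]
  | cons t ts ih =>
    by_cases h : pvMatches pvSauceKeywords t = true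
    · have ht := ne_none_of_matches matches_sauce_none h
      simp [pvLoopA, pvPick, hb, h, loopA_done b t ing ts hb ht]
    · simp only [Bool.not_eq_true] at h
      simp [pvLoopA, pvPick, hb, h, ih]

lemma loopA_sauce_set (s : String) (ing ts : List String) (hs : (s == "none") = false) :
    pvLoopA "none" s ing ts =
      ((pvPick pvBaseKeywords ts).1.getD "none", s, ing ++ (pvPick pvBaseKeywords ts).2) := by
  induction ts generalizing ing with
  | nil => simp [pvLoopA, pvPick]
  | cons t ts ih =>
    by_cases h : pvMatches pvBaseKeywords t = true
    · have ht := ne_none_of_matches matches_base_none h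
      simp [pvLoopA, pvPick, h, loopA_done t s ing ts ht hs]
    · simp only [Bool.not_eq_true] at h
      simp [pvLoopA, pvPick, hs, h, ih]

lemma loopA_eq_picks (ing ts : List String) :
    pvLoopA "none" "none" ing ts =
      ((pvPick pvBaseKeywords ts).1.getD "none",
       (pvPick pvSauceKeywords (pvPick pvBaseKeywords ts).2).1.getD "none",
       ing ++ (pvPick pvSauceKeywords (pvPick pvBaseKeywords ts).2).2) := by
  induction ts generalizing ing with
  | nil => simp [pvLoopA, pvPick]
  | cons t ts ih =>
    by_cases hbm : pvMatches pvBaseKeywords t = true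
    · have ht := ne_none_of_matches matches_base_none hbm
      simp [pvLoopA, pvPick, hbm, loopA_base_set t ing ts ht]
    · simp only [Bool.not_eq_true] at hbm
      by_cases hsm : pvMatches pvSauceKeywords t = true
      · have ht := ne_none_of_matches matches_sauce_none hsm
        simp [pvLoopA, pvPick, hbm, hsm, loopA_sauce_set t ing ts ht]
      · simp only [Bool.not_eq_true] at hsm
        simp [pvLoopA, pvPick, hbm, hsm, ih]

lemma hit_eq_matches (kws : List String) (t : String) : pvHit kws t = pvMatches kws t := rfl

lemma map_getD_range (ts : List String) :
    (List.range ts.length).map (fun i => ts[i]?.getD "") = ts := by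
  induction ts with
  | nil => rfl
  | cons t ts ih => simp [List.range_succ_eq_map, List.map_map, Function.comp_def, ih]

-- Option-index bookkeeping for the shift by one
lemma beq_succ_map (i : Nat) (b : Option Nat) :
    ((some (i + 1) : Option Nat) == b.map Nat.succ) = ((some i : Option Nat) == b) := by
  cases b <;> simp [Nat.succ_eq_add_one]

-- shift an excluded index down by one (the head index 0 is handled separately)
def pvPred : Option Nat → Option Nat
  | some (k + 1) => some k
  | _ => none

lemma beq_pred (i : Nat) (b : Option Nat) (hb : (b == some 0) = false) :
    ((some (i + 1) : Option Nat) == b) = ((some i : Option Nat) == pvPred b) := by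
  cases b with
  | none => simp [pvPred]
  | some k => cases k with
    | zero => simp at hb
    | succ k => simp [pvPred]

-- index search with one excluded index  =  pvPick on the list with that index filtered out
lemma excl_search_eq_pick (kws : List String) (ts : List String) (b : Option Nat) :
    (((List.range ts.length).find? (fun i => !(some i == b) && pvMatches kws (ts.getD i ""))).map
        (fun i => ts.getD i ""))
      = (pvPick kws (((List.range ts.length).filter (fun i => !(some i == b))).map (fun i => ts.getD i ""))).1
    ∧ ((List.range ts.length).filter (fun i => !(some i == b) &&
          !(some i == (List.range ts.length).find? (fun j => !(some j == b) && pvMatches kws (ts.getD j ""))))).map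
        (fun i => ts.getD i "")
      = (pvPick kws (((List.range ts.length).filter (fun i => !(some i == b))).map (fun i => ts.getD i ""))).2 := by
  induction ts generalizing b with
  | nil => simp [pvPick]
  | cons t ts ih =>
    by_cases hb : (b == some 0) = true
    · -- head index excluded: everything shifts to the tail with no exclusion
      have hb' : b = some 0 := by cases b <;> simp_all
      subst hb'
      have ihn := ih none
      simp only [List.length_cons, List.range_succ_eq_map, List.find?_cons, List.filter_cons,
        List.find?_map, List.filter_map] at *
      simpa [Function.comp_def, beq_succ_map, pvPred] using ihn
    · have hb' : (b == some 0) = false := by simpa using hb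
      have hhead : ((some 0 : Option Nat) == b) = false := by
        cases b with
        | none => rfl
        | some k => cases k with
          | zero => simp at hb'
          | succ k => simp
      by_cases hm : pvMatches kws t = true
      · -- head is the match: the pick takes t, the filters keep the shifted remainder
        simp only [List.length_cons, List.range_succ_eq_map, List.find?_cons, List.filter_cons,
          List.find?_map, List.filter_map] at *
        simp [hhead, hm, Function.comp_def, beq_pred _ b hb', pvPick]
      · have hm' : pvMatches kws t = false := by simpa using hm
        have ihp := ih (pvPred b)
        simp only [List.length_cons, List.range_succ_eq_map, List.find?_cons, List.filter_cons,
          List.find?_map, List.filter_map] at *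
        simp [hhead, hm', Function.comp_def, beq_pred _ b hb', beq_succ_map, pvPick] at ihp ⊢
        exact ihp

-- the two no-exclusion corollaries: plain base search value and remainder
lemma base_search (ts : List String) :
    (((List.range ts.length).find? (fun i => pvMatches pvBaseKeywords (ts.getD i ""))).map
        (fun i => ts.getD i "")) = (pvPick pvBaseKeywords ts).1
    ∧ ((List.range ts.length).filter (fun i =>
          !(some i == (List.range ts.length).find? (fun j => pvMatches pvBaseKeywords (ts.getD j ""))))).map
        (fun i => ts.getD i "") = (pvPick pvBaseKeywords ts).2 := by
  have h := excl_search_eq_pick pvBaseKeywords ts none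
  simpa [List.getD, map_getD_range] using h

lemma match_opt (o : Option Nat) (ts : List String) :
    (match o with | some i => ts.getD i "" | none => "none")
      = (o.map (fun i => ts.getD i "")).getD "none" := by
  cases o <;> rfl

-- ===== VERDICT (by name: the statement is the Claim_ definition above) =====
theorem split_meal_components_spec : Claim_equal_split_meal_components := by
  intro item _
  show split_meal_components item = split_meal_components_alt item
  rw [split_meal_components, split_meal_components_alt]
  simp only [hit_eq_matches]
  generalize pvTokens item = nt
  obtain ⟨name, ts⟩ := nt
  obtain ⟨hbv, hbr⟩ := base_search ts
  have hexcl := excl_search_eq_pick pvSauceKeywords ts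
      ((List.range ts.length).find? (fun i => pvMatches pvBaseKeywords (ts.getD i "")))
  simp only [loopA_eq_picks, List.nil_append, match_opt, hbv, hbr, hexcl.1, hexcl.2]
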